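-- pv_equiv track=rewrite | github.com/ICPSUWGLab/Aayush | scripts/pdf_plum.py | chunk_by_headings
-- ===== SOURCE A (Python) =====
-- def chunk_by_headings(data, max_chunk_size=500):
--     chunks = []
--
--     for section in data:
--         heading = section["heading"]
--         words = section["content"].split()
--
--         for i in range(0, len(words), max_chunk_size):
--             chunk = " ".join(words[i:i + max_chunk_size])
--             chunks.append(f"{heading}\n{chunk}")
--
--     return chunks
-- ===== SOURCE B (Python) =====
-- def chunk_by_headings(data, max_chunk_size=500):
--     chunks = []
--     for section in data:
--         heading = section["heading"]
--         buf = []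
--         for word in section["content"].split():
--             buf.append(word)
--             if len(buf) == max_chunk_size:
--                 chunks.append(f"{heading}\n{' '.join(buf)}")
--                 buf = []
--         if buf:
--             chunks.append(f"{heading}\n{' '.join(buf)}")
--     return chunks
-- ===== Notes on version B (the rewrite author's own statement) =====
-- stated objective: alternative
-- what changed: Replaces A's index arithmetic (range stepping by max_chunk_size and slicing words[i:i+max_chunk_size]) with a single streaming pass that accumulates words in a buffer and flushes a chunk whenever the buffer reaches max_chunk_size, with a guarded remainder flush per section.
-- outside the precondition, e.g. on chunk_by_headings([{'heading': 'h', 'content': 'a b'}], -1): A returns [], B returns ['h\na b']; on chunk_by_headings([{'heading': 'h', 'content': 'a b'}], 0): A raises ValueError, B returns ['h\na b']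
import Mathlib
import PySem

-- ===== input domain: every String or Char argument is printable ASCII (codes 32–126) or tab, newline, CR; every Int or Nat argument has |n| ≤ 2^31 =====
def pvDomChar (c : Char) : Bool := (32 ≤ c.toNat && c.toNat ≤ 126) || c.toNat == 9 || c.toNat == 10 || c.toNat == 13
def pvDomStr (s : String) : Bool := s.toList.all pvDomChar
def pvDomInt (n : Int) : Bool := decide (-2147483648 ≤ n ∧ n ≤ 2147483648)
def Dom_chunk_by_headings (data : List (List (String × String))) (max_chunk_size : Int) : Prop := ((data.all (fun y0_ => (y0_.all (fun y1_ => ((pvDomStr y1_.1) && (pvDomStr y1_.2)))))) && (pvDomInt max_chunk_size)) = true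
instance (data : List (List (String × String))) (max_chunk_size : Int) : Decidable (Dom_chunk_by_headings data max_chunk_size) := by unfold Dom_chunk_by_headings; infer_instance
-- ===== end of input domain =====

-- B replaces A's range/slice chunking by a single pass that accumulates words in a buffer
-- and flushes it whenever it reaches max_chunk_size (objective: alternative decomposition, same cost).


-- ===== PORT A =====
-- shared by both ports: section[key] (assoc-list first match; Pre_ guarantees the key is present)
def pvLookup (sec : List (String × String)) (key : String) : String :=
  ((sec.find? (fun kv => kv.1 == key)).map (·.2)).getD ""

-- shared by both ports: f"{heading}\n{' '.join(buf)}"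
def pvChunk (heading : String) (buf : List String) : String :=
  PySem.Str.join "\n" [heading, PySem.Str.join " " buf]

def chunk_by_headings (data : List (List (String × String))) (max_chunk_size : Int) : List String :=
  data.foldl (fun chunks sec =>
    let heading := pvLookup sec "heading"
    let words := PySem.Str.split₀ (pvLookup sec "content")
    (PySem.List.pyRange 0 (words.length : Int) max_chunk_size).foldl
      (fun chunks i =>
        chunks ++ [pvChunk heading (PySem.List.slice words (some i) (some (i + max_chunk_size)))])
      chunks) []

-- ===== PORT B =====
-- the per-section word loop of Source B: push each word into buf, flush at max_chunk_size, flush the remainder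
def pvSecB (m : Int) (heading : String) (chunks buf : List String) : List String → List String
  | [] => if buf.isEmpty then chunks else chunks ++ [pvChunk heading buf]
  | w :: ws =>
      let buf' := buf ++ [w]
      if (buf'.length : Int) = m then
        pvSecB m heading (chunks ++ [pvChunk heading buf']) [] ws
      else
        pvSecB m heading chunks buf' ws

def chunk_by_headings_alt (data : List (List (String × String))) (max_chunk_size : Int) : List String :=
  data.foldl (fun chunks sec =>
    pvSecB max_chunk_size (pvLookup sec "heading") chunks []
      (PySem.Str.split₀ (pvLookup sec "content"))) []

-- ===== PRECONDITION & SPEC =====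
-- Pre_ excludes (a) sections missing a "heading"/"content" key, where A raises KeyError, and
-- (b) non-positive max_chunk_size when some section actually has words: at 0 A raises ValueError
-- (zero range step), and for negative sizes the empty negative-step range makes A silently drop
-- every section's content — an artefact of range semantics on a corner no caller would specify,
-- where B keeps the content instead.  (Non-positive sizes with no words at all stay inside Pre_.)
def Pre_chunk_by_headings (data : List (List (String × String))) (max_chunk_size : Int) : Prop :=
  data.all (fun sec => sec.any (fun kv => kv.1 == "heading") && sec.any (fun kv => kv.1 == "content")) = true ∧
    (1 ≤ max_chunk_size ∨ data = [] ∨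
      (max_chunk_size < 0 ∧
        data.all (fun sec =>
          (PySem.Str.split₀ (((sec.find? (fun kv => kv.1 == "content")).map (·.2)).getD "")).isEmpty) = true))
instance (data : List (List (String × String))) (max_chunk_size : Int) : Decidable (Pre_chunk_by_headings data max_chunk_size) := by unfold Pre_chunk_by_headings; infer_instance

def pvWitness_chunk_by_headings : (List (List (String × String))) × Int :=
  ([[("heading", "T"), ("content", "a b c")]], 2)

def Spec_chunk_by_headings (data : List (List (String × String))) (max_chunk_size : Int) (out : List String) : Prop := out = chunk_by_headings_alt data max_chunk_size
instance (data : List (List (String × String))) (max_chunk_size : Int) (out : List String) : Decidable (Spec_chunk_by_headings data max_chunk_size out) := by unfold Spec_chunk_by_headings; infer_instance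

-- ===== CLAIM (what is proved, stated in full; the proofs are below) =====
def Claim_equal_chunk_by_headings : Prop := ∀ (data : List (List (String × String))) (max_chunk_size : Int), Dom_chunk_by_headings data max_chunk_size → Pre_chunk_by_headings data max_chunk_size → Spec_chunk_by_headings data max_chunk_size (chunk_by_headings data max_chunk_size)

-- ===== LEMMAS AND PROOFS =====

-- the common value both per-section loops compute: words grouped into blocks of m
def gchunks (m : Nat) (h : String) : List String → List String
  | [] => []
  | w :: ws => pvChunk h (w :: ws.take (m - 1)) :: gchunks m h (ws.drop (m - 1))
termination_by l => l.length
decreasing_by simp only [List.length_drop, List.length_cons]; omega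

theorem gchunks_cons {m : Nat} (hm : 1 ≤ m) (h : String) (l : List String) (hl : l ≠ []) :
    gchunks m h l = pvChunk h (l.take m) :: gchunks m h (l.drop m) := by
  cases l with
  | nil => exact absurd rfl hl
  | cons w ws =>
      obtain ⟨m', rfl⟩ : ∃ m', m = m' + 1 := ⟨m - 1, by omega⟩
      simp [gchunks]

theorem pvSecB_acc (m : Int) (h : String) : ∀ (ws chunks buf : List String),
    pvSecB m h chunks buf ws = chunks ++ pvSecB m h [] buf ws := by
  intro ws
  induction ws with
  | nil => intro chunks buf; by_cases hb : buf.isEmpty <;> simp [pvSecB, hb]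
  | cons w ws ih =>
      intro chunks buf
      simp only [pvSecB]
      by_cases hc : ((buf ++ [w]).length : Int) = m
      · simp only [if_pos hc]
        rw [ih, ih ([] ++ [pvChunk h (buf ++ [w])])]
        simp
      · simp only [if_neg hc]; rw [ih]

theorem pvSecB_eq_gchunks {m : Nat} (hm : 1 ≤ m) (h : String) : ∀ (ws buf : List String),
    buf.length < m → pvSecB (m : Int) h [] buf ws = gchunks m h (buf ++ ws) := by
  intro ws
  induction ws with
  | nil =>
      intro buf hb
      cases buf with
      | nil => simp [pvSecB, gchunks]
      | cons b bs =>
          simp only [pvSecB, List.isEmpty_cons, List.append_nil]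
          have : (bs.take (m - 1)) = bs := List.take_of_length_le (by simp at hb; omega)
          have hd : (bs.drop (m - 1)) = [] := List.drop_eq_nil_of_le (by simp at hb; omega)
          simp [gchunks, this, hd]
  | cons w ws ih =>
      intro buf hb
      simp only [pvSecB]
      by_cases hc : ((buf ++ [w]).length : Int) = (m : Int)
      · have hlen : (buf ++ [w]).length = m := by exact_mod_cast hc
        simp only [if_pos hc]
        rw [pvSecB_acc, ih [] (by simp; omega)]
        simp only [List.nil_append]
        have hsplit : buf ++ w :: ws = (buf ++ [w]) ++ ws := by simp
        rw [hsplit, gchunks_cons hm h ((buf ++ [w]) ++ ws) (by simp), ← hlen,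
            List.take_left, List.drop_left]
        simp
      · have hlen : (buf ++ [w]).length ≠ m := fun e => hc (by exact_mod_cast e)
        simp only [if_neg hc]
        rw [ih (buf ++ [w]) (by simp at hlen ⊢; omega)]
        simp

-- number of chunks: ceil(n / m)
def cntN (m n : Nat) : Nat := (n + m - 1) / m

theorem cntN_zero {m : Nat} (hm : 1 ≤ m) : cntN m 0 = 0 := by
  unfold cntN; exact Nat.div_eq_of_lt (by omega)

theorem cntN_succ {m : Nat} (hm : 1 ≤ m) (n : Nat) : cntN m (n + 1) = cntN m (n + 1 - m) + 1 := by
  unfold cntN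
  have h1 : n + 1 + m - 1 = n + m := by omega
  rw [h1, Nat.add_div_right _ (by omega)]
  by_cases hcase : n + 1 ≤ m
  · have : n + 1 - m = 0 := by omega
    rw [this]
    have : n / m = 0 := Nat.div_eq_of_lt (by omega)
    rw [this]
    exact congrArg (· + 1) (Nat.div_eq_of_lt (by omega)).symm
  · have : n + 1 - m + m - 1 = n := by omega
    rw [this]

theorem range_map_eq_gchunks {m : Nat} (hm : 1 ≤ m) (h : String) :
    ∀ (n : Nat) (words : List String), words.length = n →
      (List.range (cntN m words.length)).map
          (fun k => pvChunk h ((words.drop (m * k)).take m)) = gchunks m h words := by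
  intro n
  induction n using Nat.strong_induction_on with
  | _ n IH =>
      intro words hlen
      cases words with
      | nil => simp [cntN_zero hm, gchunks]
      | cons w ws =>
          have hcnt : cntN m (w :: ws).length = cntN m (ws.length + 1 - m) + 1 := by
            simp only [List.length_cons]; exact cntN_succ hm ws.length
          rw [hcnt, List.range_succ_eq_map, List.map_cons, List.map_map]
          have hdrop0 : ((w :: ws).drop (m * 0)).take m = w :: ws.take (m - 1) := by
            obtain ⟨m', rfl⟩ : ∃ m', m = m' + 1 := ⟨m - 1, by omega⟩
            simp
          have hws' : ((w :: ws).drop m) = ws.drop (m - 1) := by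
            obtain ⟨m', rfl⟩ : ∃ m', m = m' + 1 := ⟨m - 1, by omega⟩
            simp
          have htail : ∀ k : Nat, ((w :: ws).drop (m * (k + 1))).take m
              = (((ws.drop (m - 1)).drop (m * k)).take m) := by
            intro k
            rw [← hws', List.drop_drop]
            congr 2
            ring
          have hlen' : (ws.drop (m - 1)).length = ws.length + 1 - m := by
            simp; omega
          have := IH (ws.drop (m - 1)).length (by simp at hlen ⊢; omega) (ws.drop (m - 1)) rfl
          rw [hlen'] at this
          calc pvChunk h (((w :: ws).drop (m * 0)).take m) ::
                (List.range (cntN m (ws.length + 1 - m))).map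
                  ((fun k => pvChunk h (((w :: ws).drop (m * k)).take m)) ∘ Nat.succ)
              = pvChunk h (w :: ws.take (m - 1)) ::
                (List.range (cntN m (ws.length + 1 - m))).map
                  (fun k => pvChunk h (((ws.drop (m - 1)).drop (m * k)).take m)) := by
                rw [hdrop0]
                congr 1
                refine List.map_congr_left (fun k _ => ?_)
                simp only [Function.comp, Nat.succ_eq_add_one]
                rw [htail k]
            _ = pvChunk h (w :: ws.take (m - 1)) :: gchunks m h (ws.drop (m - 1)) := by rw [this]
            _ = gchunks m h (w :: ws) := by rw [gchunks]

-- A's inner range/slice loop produces exactly gchunks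
theorem rangeA_eq_gchunks {m : Nat} (hm : 1 ≤ m) (h : String) (words : List String) :
    (PySem.List.pyRange 0 (words.length : Int) (m : Int)).map
        (fun i => pvChunk h (PySem.List.slice words (some i) (some (i + (m : Int)))))
      = gchunks m h words := by
  rw [PySem.List.pyRange_of_pos 0 (words.length : Int) (by exact_mod_cast hm), List.map_map]
  have hcnt : (if (0 : Int) < (words.length : Int)
      then (((words.length : Int) - 0 + (m : Int) - 1) / (m : Int)).toNat else 0)
      = cntN m words.length := by
    by_cases hw : (0 : Int) < (words.length : Int)
    · rw [if_pos hw]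
      unfold cntN
      have h1 : ((words.length : Int) - 0 + (m : Int) - 1) = ((words.length + m - 1 : Nat) : Int) := by
        push_cast [Nat.cast_sub (by omega : 1 ≤ words.length + m)]; ring
      rw [h1, ← Int.natCast_div, Int.toNat_natCast]
    · rw [if_neg hw]
      have : words.length = 0 := by omega
      rw [this, cntN_zero hm]
  rw [hcnt]
  refine Eq.trans (List.map_congr_left ?_) (range_map_eq_gchunks hm h words.length words rfl)
  intro k _
  simp only [Function.comp]
  congr 1
  have h1 : (0 : Int) + (m : Int) * (k : Int) = ((m * k : Nat) : Int) := by push_cast; ring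
  rw [h1, PySem.List.slice_natCast_add]

theorem step_eq {m : Nat} (hm : 1 ≤ m) (chunks : List String) (sec : List (String × String)) :
    (let heading := pvLookup sec "heading"
     let words := PySem.Str.split₀ (pvLookup sec "content")
     (PySem.List.pyRange 0 (words.length : Int) (m : Int)).foldl
       (fun chunks i =>
         chunks ++ [pvChunk heading (PySem.List.slice words (some i) (some (i + (m : Int))))])
       chunks)
    = pvSecB (m : Int) (pvLookup sec "heading") chunks [] (PySem.Str.split₀ (pvLookup sec "content")) := by
  simp only
  rw [PySem.List.foldl_append_singleton_eq_map, rangeA_eq_gchunks hm, pvSecB_acc,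
      pvSecB_eq_gchunks hm _ _ [] (by simpa using hm), List.nil_append]

theorem folds_eq {m : Nat} (hm : 1 ≤ m) :
    ∀ (data : List (List (String × String))) (chunks : List String),
      data.foldl (fun chunks sec =>
        let heading := pvLookup sec "heading"
        let words := PySem.Str.split₀ (pvLookup sec "content")
        (PySem.List.pyRange 0 (words.length : Int) (m : Int)).foldl
          (fun chunks i =>
            chunks ++ [pvChunk heading (PySem.List.slice words (some i) (some (i + (m : Int))))])
          chunks) chunks
      = data.foldl (fun chunks sec =>
          pvSecB (m : Int) (pvLookup sec "heading") chunks []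
            (PySem.Str.split₀ (pvLookup sec "content"))) chunks := by
  intro data
  induction data with
  | nil => intro chunks; rfl
  | cons sec rest ih =>
      intro chunks
      simp only [List.foldl_cons]
      rw [step_eq hm chunks sec]
      exact ih _

theorem pyRange_zero_zero (s : Int) : PySem.List.pyRange 0 0 s = [] := by
  unfold PySem.List.pyRange
  split_ifs <;> simp <;> omega

-- the no-words case: both sides emit nothing for every section
theorem folds_eq_empty (m : Int) :
    ∀ (data : List (List (String × String))),
      data.all (fun sec =>
          (PySem.Str.split₀ (((sec.find? (fun kv => kv.1 == "content")).map (·.2)).getD "")).isEmpty) = true →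
      ∀ chunks : List String,
      data.foldl (fun chunks sec =>
        let heading := pvLookup sec "heading"
        let words := PySem.Str.split₀ (pvLookup sec "content")
        (PySem.List.pyRange 0 (words.length : Int) m).foldl
          (fun chunks i =>
            chunks ++ [pvChunk heading (PySem.List.slice words (some i) (some (i + m)))])
          chunks) chunks
      = data.foldl (fun chunks sec =>
          pvSecB m (pvLookup sec "heading") chunks []
            (PySem.Str.split₀ (pvLookup sec "content"))) chunks := by
  intro data
  induction data with
  | nil => intro _ chunks; rfl
  | cons sec rest ih =>
      intro hall chunks
      simp only [List.all_cons, Bool.and_eq_true] at hall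
      obtain ⟨hsec, hrest⟩ := hall
      have hwords : PySem.Str.split₀ (pvLookup sec "content") = [] := by
        rw [List.isEmpty_iff] at hsec; exact hsec
      simp only [List.foldl_cons]
      rw [ih hrest]
      congr 1
      simp only [hwords, List.length_nil, Nat.cast_zero, pyRange_zero_zero, List.foldl_nil]
      rfl

-- ===== VERDICT (by name: the statement is the Claim_ definition above) =====
theorem chunk_by_headings_spec : Claim_equal_chunk_by_headings := by
  intro data max_chunk_size _ hpre
  obtain ⟨_, hm | hnil | ⟨hneg, hempty⟩⟩ := hpre
  · obtain ⟨mN, rfl⟩ : ∃ mN : Nat, max_chunk_size = (mN : Int) :=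
      ⟨max_chunk_size.toNat, (Int.toNat_of_nonneg (by omega)).symm⟩
    have hm1 : 1 ≤ mN := by exact_mod_cast hm
    show chunk_by_headings data (mN : Int) = chunk_by_headings_alt data (mN : Int)
    unfold chunk_by_headings chunk_by_headings_alt
    exact folds_eq hm1 data []
  · subst hnil; rfl
  · show chunk_by_headings data max_chunk_size = chunk_by_headings_alt data max_chunk_size
    unfold chunk_by_headings chunk_by_headings_alt
    exact folds_eq_empty max_chunk_size data hempty []
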